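-- pv_equiv track=rewrite | github.com/Heesu01/BAEKJOON | 프로그래머스/0/120850. 문자열 정렬하기 （1）/문자열 정렬하기 （1）.py | solution
-- ===== SOURCE A (Python) =====
-- def solution(my_string):
--     answer = []
--     li = [str(i) for i in range(10)]
--     for i in range(0,len(my_string)):
--         if my_string[i] in li:
--             answer.append(my_string[i] )
--     answer.sort()
--     answer = [int(x) for x in answer]
--     return answer
-- ===== SOURCE B (Python) =====
-- def solution(my_string):
--     # bucket emission: for each digit value in ascending order, emit one copy
--     # per occurrence in the string -- no collected list, no sort
--     return [d for d in range(10) for ch in my_string if ord(ch) - 48 == d]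
-- ===== Notes on version B (the rewrite author's own statement) =====
-- stated objective: alternative
-- what changed: replaces collect-digits-then-sort with direct bucket emission: for each digit value 0..9 in order, emit it once per occurrence, so no intermediate list and no sort
import Mathlib
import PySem

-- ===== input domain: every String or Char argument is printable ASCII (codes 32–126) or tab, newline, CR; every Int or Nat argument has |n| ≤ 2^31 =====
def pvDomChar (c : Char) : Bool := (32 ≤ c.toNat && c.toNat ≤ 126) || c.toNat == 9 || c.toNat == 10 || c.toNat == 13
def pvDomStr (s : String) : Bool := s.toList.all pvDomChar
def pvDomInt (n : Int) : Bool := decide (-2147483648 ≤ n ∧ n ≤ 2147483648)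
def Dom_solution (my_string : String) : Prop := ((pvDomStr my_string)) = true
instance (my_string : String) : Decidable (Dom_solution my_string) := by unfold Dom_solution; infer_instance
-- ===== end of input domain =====

-- B replaces collect-digits-then-sort by direct bucket emission per digit value (alternative algorithm, no sort).

-- ===== PORT A =====
-- li = [str(i) for i in range(10)]; each str(i) is a one-character string, held here as its character
def liA : List Char := ((PySem.List.pyRange 0 10 1).map PySem.Int.toStr).flatMap String.toList

def solution (my_string : String) : List Int :=
  let answer : List Char :=
    (PySem.List.pyRange 0 ((PySem.Str.len my_string : Int)) 1).foldl
      (fun acc i =>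
        -- my_string[i]: i ranges over 0..len-1, so the index is always in range
        if PySem.List.pyGetD my_string.toList i ' ' ∈ liA then
          acc ++ [PySem.List.pyGetD my_string.toList i ' ']
        else acc) []
  let answer := PySem.List.sorted answer (fun x => x) false
  -- int(x): x is always a single digit character here, so int() never raises
  answer.map (fun x => (PySem.Int.ofChars? [x]).getD 0)

-- ===== PORT B =====
def solution_alt (my_string : String) : List Int :=
  (PySem.List.pyRange 0 10 1).flatMap (fun d =>
    (my_string.toList.filter (fun ch => ((ch.toNat : Int) - 48) == d)).map (fun _ => d))

-- ===== PRECONDITION & SPEC =====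
def Spec_solution (my_string : String) (out : List Int) : Prop := out = solution_alt my_string
instance (my_string : String) (out : List Int) : Decidable (Spec_solution my_string out) := by unfold Spec_solution; infer_instance

-- ===== CLAIM (what is proved, stated in full; the proofs are below) =====
def Claim_equal_solution : Prop := ∀ (my_string : String), Dom_solution my_string → Spec_solution my_string (solution my_string)


-- ===== LEMMAS AND PROOFS =====

-- the character-level filter predicate of bucket d in B
def qdB (d : Int) : Char → Bool := fun ch => ((ch.toNat : Int) - 48) == d

-- B's buckets, before the characters are replaced by the digit value d
def ysC (l : List Char) : List Char :=
  (PySem.List.pyRange 0 10 1).flatMap (fun d => l.filter (qdB d))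

lemma mem_liA_iff (c : Char) : c ∈ liA ↔ 48 ≤ c.toNat ∧ c.toNat < 58 := by
  have h : liA = ['0','1','2','3','4','5','6','7','8','9'] := by decide
  rw [h]
  constructor
  · intro hm
    fin_cases hm <;> decide
  · rintro ⟨h1, h2⟩
    rw [← Char.ofNat_toNat c]
    generalize c.toNat = n at h1 h2 ⊢
    interval_cases n <;> decide

lemma intChar_digit (c : Char) (h1 : 48 ≤ c.toNat) (h2 : c.toNat < 58) :
    PySem.Int.ofChars? [c] = some ((c.toNat : Int) - 48) := by
  rw [← Char.ofNat_toNat c]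
  generalize c.toNat = n at h1 h2 ⊢
  interval_cases n <;> decide

lemma count_filter_ite (p : Char → Bool) (l : List Char) (a : Char) :
    List.count a (l.filter p) = if p a then List.count a l else 0 := by
  induction l with
  | nil => simp
  | cons x t ih =>
    by_cases hax : a = x
    · subst hax
      by_cases hx : p a <;> simp [hx, ih]
    · by_cases hx : p x <;>
        simp [hx, ih, (Ne.symm hax : x ≠ a)]

set_option maxHeartbeats 1000000 in
lemma perm_ysC (l : List Char) :
    (ysC l).Perm (l.filter (fun c => decide (c ∈ liA))) := by
  rw [List.perm_iff_count]
  intro a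
  have hr : PySem.List.pyRange 0 10 1 = [0,1,2,3,4,5,6,7,8,9] := by decide
  rw [ysC, hr]
  simp only [List.flatMap_def, List.map_cons, List.map_nil, List.count_flatten,
    count_filter_ite, qdB, beq_iff_eq]
  have hmem : decide (a ∈ liA) = decide (48 ≤ a.toNat ∧ a.toNat < 58) := by
    simp [mem_liA_iff]
  rw [hmem]
  have hnn : (0 : Int) ≤ (a.toNat : Int) := Int.natCast_nonneg _
  simp only [List.sum_cons, List.sum_nil, decide_eq_true_eq]
  clear hmem hr
  generalize a.toNat = n at hnn ⊢
  by_cases h : 48 ≤ n ∧ n < 58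
  · rw [if_pos h]
    obtain ⟨h1, h2⟩ := h
    interval_cases n <;> norm_num
  · rw [if_neg h]
    rw [if_neg (show ¬((n : Int) - 48 = 0) by omega)]
    rw [if_neg (show ¬((n : Int) - 48 = 1) by omega)]
    rw [if_neg (show ¬((n : Int) - 48 = 2) by omega)]
    rw [if_neg (show ¬((n : Int) - 48 = 3) by omega)]
    rw [if_neg (show ¬((n : Int) - 48 = 4) by omega)]
    rw [if_neg (show ¬((n : Int) - 48 = 5) by omega)]
    rw [if_neg (show ¬((n : Int) - 48 = 6) by omega)]
    rw [if_neg (show ¬((n : Int) - 48 = 7) by omega)]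
    rw [if_neg (show ¬((n : Int) - 48 = 8) by omega)]
    rw [if_neg (show ¬((n : Int) - 48 = 9) by omega)]
    norm_num

lemma pairwise_ysC (l : List Char) : (ysC l).Pairwise (· ≤ ·) := by
  rw [ysC, List.flatMap_def, List.pairwise_flatten]
  constructor
  · intro m hm
    simp only [List.mem_map] at hm
    obtain ⟨d, _, rfl⟩ := hm
    apply List.pairwise_of_forall_mem_list
    intro x hx y hy
    simp only [List.mem_filter, qdB, beq_iff_eq] at hx hy
    rw [Char.le_def, UInt32.le_iff_toNat_le]
    show x.toNat ≤ y.toNat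
    omega
  · rw [List.pairwise_map]
    apply (PySem.List.pairwise_lt_pyRange_one 0 10).imp
    intro d d' hdd x hx y hy
    simp only [List.mem_filter, qdB, beq_iff_eq] at hx hy
    rw [Char.le_def, UInt32.le_iff_toNat_le]
    show x.toNat ≤ y.toNat
    omega

lemma map_intChar_ysC (l : List Char) :
    (ysC l).map (fun x => (PySem.Int.ofChars? [x]).getD 0)
      = (PySem.List.pyRange 0 10 1).flatMap (fun d => (l.filter (qdB d)).map (fun _ => d)) := by
  rw [ysC, List.map_flatMap, List.flatMap_def, List.flatMap_def]
  congr 1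
  apply List.map_congr_left
  intro d hd
  rw [PySem.List.mem_pyRange_one] at hd
  apply List.map_congr_left
  intro x hx
  simp only [List.mem_filter, qdB, beq_iff_eq] at hx
  have h1 : 48 ≤ x.toNat := by omega
  have h2 : x.toNat < 58 := by omega
  rw [intChar_digit x h1 h2]
  simp [hx.2]


-- ===== VERDICT (by name: the statement is the Claim_ definition above) =====
theorem solution_spec : Claim_equal_solution := by
  intro s _
  unfold Spec_solution
  show solution s = solution_alt s
  simp only [solution]
  have hlen : PySem.Str.len s = ((s.toList.length : Nat) : Int) := by simp
  rw [hlen,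
    PySem.List.foldl_pyRange_zero_pyGetD' s.toList ' '
      (fun acc c => if c ∈ liA then acc ++ [c] else acc) [],
    PySem.List.foldl_append_ite_eq_filter, List.nil_append,
    PySem.List.sorted_id_eq_of_perm_of_pairwise _ _ (perm_ysC s.toList) (pairwise_ysC s.toList),
    map_intChar_ysC]
  rfl
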